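-- pv_equiv track=rewrite | github.com/aidamzz/algorithm | Count _increasing_subarray.py | count_subarray
-- ===== SOURCE A (Python) =====
-- def count_subarray(A):
--     current = 1
--     n = len(A)
--     count = 1
--     length =1
--     for i in range(1, n):
--         if A[i-1] < A[i]:
--             current += 1
--         else:
--             current = 1
--         if current == length:
--             count +=1
--         elif current > length:
--             count = 1
--             length = current
--     return count
-- ===== SOURCE B (Python) =====
-- def count_subarray(A):
--     if not A:
--         return 1
--     lengths = []
--     run = 1
--     for prev, x in zip(A, A[1:]):
--         if prev < x:
--             run += 1
--         else:
--             lengths.append(run)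
--             run = 1
--     lengths.append(run)
--     return lengths.count(max(lengths))
-- ===== Notes on version B (the rewrite author's own statement) =====
-- stated objective: simpler
-- what changed: Instead of A's on-the-fly triple of current/count/length with equal-vs-greater bookkeeping, B builds the explicit list of maximal increasing-run lengths in one zip pass and returns lengths.count(max(lengths)); empty input keeps A's value 1.
import Mathlib
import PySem

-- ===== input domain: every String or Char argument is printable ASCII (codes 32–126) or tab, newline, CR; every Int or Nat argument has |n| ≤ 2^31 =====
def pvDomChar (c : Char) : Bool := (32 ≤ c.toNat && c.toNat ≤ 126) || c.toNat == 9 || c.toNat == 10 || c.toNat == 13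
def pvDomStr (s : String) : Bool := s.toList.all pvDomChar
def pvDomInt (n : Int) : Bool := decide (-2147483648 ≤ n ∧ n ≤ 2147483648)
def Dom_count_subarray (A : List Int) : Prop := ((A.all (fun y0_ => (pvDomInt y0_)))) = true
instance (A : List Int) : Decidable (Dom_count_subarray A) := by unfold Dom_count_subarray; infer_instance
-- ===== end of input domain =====

-- B replaces A's on-the-fly current/count/length tracking by building the explicit list of
-- maximal increasing-run lengths in one pass and returning lengths.count(max(lengths)) (simpler).

-- ===== PORT A =====
def count_subarray (A : List Int) : Int :=
  let n := PySem.List.len A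
  ((PySem.List.pyRange 1 n 1).foldl
    (fun (st : Int × Int × Int) i =>
      let current := if PySem.List.pyGetD A (i-1) 0 < PySem.List.pyGetD A i 0 then st.1 + 1 else (1:Int)
      if current = st.2.2 then (current, st.2.1 + 1, st.2.2)
      else if current > st.2.2 then (current, 1, current)
      else (current, st.2.1, st.2.2))
    (1, 1, 1)).2.1

-- ===== PORT B =====
def count_subarray_alt (A : List Int) : Int :=
  if A = [] then 1
  else
    let st := (A.zip (A.drop 1)).foldl
      (fun (st : List Int × Int) pq =>
        if pq.1 < pq.2 then (st.1, st.2 + 1) else (st.1 ++ [st.2], 1))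
      ([], 1)
    let lengths := st.1 ++ [st.2]
    match PySem.List.max? lengths (fun x => x) with
    | some L => (PySem.List.count lengths L : Int)
    | none => 0

-- ===== PRECONDITION & SPEC =====
def Spec_count_subarray (A : List Int) (out : Int) : Prop := out = count_subarray_alt A
instance (A : List Int) (out : Int) : Decidable (Spec_count_subarray A out) := by unfold Spec_count_subarray; infer_instance

-- ===== CLAIM (what is proved, stated in full; the proofs are below) =====
def Claim_equal_count_subarray : Prop := ∀ (A : List Int), Dom_count_subarray A → Spec_count_subarray A (count_subarray A)

-- ===== LEMMAS AND PROOFS =====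

-- the two loop bodies, on a (prev, cur) pair
def pvAStep (st : Int × Int × Int) (pq : Int × Int) : Int × Int × Int :=
  let current := if pq.1 < pq.2 then st.1 + 1 else (1:Int)
  if current = st.2.2 then (current, st.2.1 + 1, st.2.2)
  else if current > st.2.2 then (current, 1, current)
  else (current, st.2.1, st.2.2)

def pvBStep (st : List Int × Int) (pq : Int × Int) : List Int × Int :=
  if pq.1 < pq.2 then (st.1, st.2 + 1) else (st.1 ++ [st.2], 1)

lemma pv_foldl_max_init (t : List Int) : ∀ a b : Int, t.foldl max (max a b) = max a (t.foldl max b) := by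
  induction t with
  | nil => intro a b; rfl
  | cons c t ih =>
      intro a b
      simp only [List.foldl_cons]
      rw [max_assoc, ih]

lemma pv_foldl_max_init' (t : List Int) (a b : Int) :
    t.foldl max (max a b) = max (t.foldl max a) b := by
  rw [max_comm a b, pv_foldl_max_init, max_comm]

-- A's index loop over range(1, n) equals the pair loop over zip(A, A[1:])
lemma pv_fold_idx (A : List Int) (f : (Int × Int × Int) → (Int × Int) → (Int × Int × Int)) :
    ∀ (m k : Nat) (s : Int × Int × Int), A.length - k = m →
    (PySem.List.pyRange ((k : Int) + 1) (PySem.List.len A) 1).foldl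
      (fun st i => f st (PySem.List.pyGetD A (i-1) 0, PySem.List.pyGetD A i 0)) s
    = ((A.drop k).zip (A.drop (k+1))).foldl f s := by
  intro m
  induction m with
  | zero =>
      intro k s hk
      have hlen : A.length ≤ k := by omega
      rw [PySem.List.pyRange_one_eq_nil (by simp [PySem.List.len]; omega)]
      rw [List.drop_eq_nil_of_le hlen]
      rfl
  | succ m ih =>
      intro k s hk
      by_cases hlt : k + 1 < A.length
      · have hcons : PySem.List.pyRange ((k : Int) + 1) (PySem.List.len A) 1
            = ((k : Int) + 1) :: PySem.List.pyRange ((k : Int) + 1 + 1) (PySem.List.len A) 1 := by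
          apply PySem.List.pyRange_one_cons
          simp [PySem.List.len]; omega
        rw [hcons]
        have hk1 : k < A.length := by omega
        have hd1 : A.drop k = A[k] :: A.drop (k+1) := (List.drop_eq_getElem_cons hk1).symm ▸ rfl
        have hd2 : A.drop (k+1) = A[k+1] :: A.drop (k+2) := (List.drop_eq_getElem_cons hlt).symm ▸ rfl
        rw [hd1, hd2]
        simp only [List.zip_cons_cons, List.foldl_cons]
        have e1 : PySem.List.pyGetD A ((k : Int) + 1 - 1) 0 = A[k] := by
          have : ((k : Int) + 1 - 1) = ((k : Nat) : Int) := by ring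
          rw [this, PySem.List.pyGetD_natCast]
          simp [List.getD, hk1]
        have e2 : PySem.List.pyGetD A ((k : Int) + 1) 0 = A[k+1] := by
          have : ((k : Int) + 1) = (((k+1 : Nat)) : Int) := by push_cast; ring
          rw [this, PySem.List.pyGetD_natCast]
          simp [List.getD, hlt]
        rw [e1, e2]
        have : ((k : Int) + 1 + 1) = (((k+1 : Nat)) : Int) + 1 := by push_cast; ring
        rw [this, ih (k+1) _ (by omega), hd2]
      · -- k+1 ≥ len: both sides are s
        rw [PySem.List.pyRange_one_eq_nil (by simp [PySem.List.len]; omega)]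
        rw [List.drop_eq_nil_of_le (by omega : A.length ≤ k + 1)]
        simp

-- main invariant: A's triple fold is determined by B's (closed runs, current run) fold
lemma pv_inv (ps : List (Int × Int)) :
    ∀ (acc : List Int) (run cnt len : Int), 1 ≤ run →
    len = acc.foldl max run →
    cnt = (acc.count len : Int) + (if run = len then 1 else 0) →
    1 ≤ (ps.foldl pvBStep (acc, run)).2
    ∧ ps.foldl pvAStep (run, cnt, len)
      = ((ps.foldl pvBStep (acc, run)).2,
         ((ps.foldl pvBStep (acc, run)).1.count
            ((ps.foldl pvBStep (acc, run)).1.foldl max (ps.foldl pvBStep (acc, run)).2) : Int)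
          + (if (ps.foldl pvBStep (acc, run)).2
                = (ps.foldl pvBStep (acc, run)).1.foldl max (ps.foldl pvBStep (acc, run)).2
             then 1 else 0),
         (ps.foldl pvBStep (acc, run)).1.foldl max (ps.foldl pvBStep (acc, run)).2) := by
  induction ps with
  | nil =>
      intro acc run cnt len h1 h2 h3
      exact ⟨h1, by simp [h2, h3]⟩
  | cons pq ps ih =>
      intro acc run cnt len h1 h2 h3
      have hrun_le : run ≤ len := h2 ▸ (PySem.List.le_foldl_max acc run).1
      simp only [List.foldl_cons]
      by_cases hlt : pq.1 < pq.2
      · -- run extends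
        have hb : pvBStep (acc, run) pq = (acc, run + 1) := by simp [pvBStep, hlt]
        have hmax : acc.foldl max (run + 1) = max len (run + 1) := by
          conv_lhs => rw [show (run + 1 : Int) = max run (run + 1) by omega]
          rw [pv_foldl_max_init', ← h2]
        by_cases heq : run + 1 = len
        · have ha : pvAStep (run, cnt, len) pq = (run + 1, cnt + 1, len) := by
            simp [pvAStep, hlt, heq]
          simp only [ha, hb]
          apply ih acc (run+1) (cnt+1) len (by omega)
          · rw [hmax]; omega
          · rw [h3]
            have h0 : ¬ (run = len) := by omega
            simp [heq, h0]
        · by_cases hgt : run + 1 > len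
          · have hrl : run = len := by omega
            have ha : pvAStep (run, cnt, len) pq = (run + 1, 1, run + 1) := by
              simp [pvAStep, hlt, heq, hgt]
            simp only [ha, hb]
            apply ih acc (run+1) 1 (run+1) (by omega)
            · rw [hmax]; omega
            · have hcnt0 : acc.count (run + 1) = 0 := by
                rw [List.count_eq_zero]
                intro hmem
                have := (PySem.List.le_foldl_max acc run).2 _ hmem
                omega
              simp [hcnt0]
          · have ha : pvAStep (run, cnt, len) pq = (run + 1, cnt, len) := by
              simp [pvAStep, hlt, heq, hgt]
            simp only [ha, hb]
            apply ih acc (run+1) cnt len (by omega)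
            · rw [hmax]; omega
            · rw [h3]
              have h0 : ¬ (run = len) := by omega
              simp [heq, h0]
      · -- run closes
        have hb : pvBStep (acc, run) pq = (acc ++ [run], 1) := by simp [pvBStep, hlt]
        have hmax : (acc ++ [run]).foldl max 1 = len := by
          rw [List.foldl_append]
          simp only [List.foldl_cons, List.foldl_nil]
          have h1' : acc.foldl max run = max run (acc.foldl max 1) := by
            have : run = max run 1 := by omega
            conv_lhs => rw [this]
            exact pv_foldl_max_init acc run 1
          rw [h2, h1']
          omega
        have hcnt_app : ((acc ++ [run]).count len : Int)
            = (acc.count len : Int) + (if run = len then 1 else 0) := by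
          rw [List.count_append]
          push_cast
          by_cases hrl : run = len
          · simp [hrl]
          · have : (run == len) = false := by simp [hrl]
            simp [hrl]
        by_cases hlen1 : (1 : Int) = len
        · have hr1 : run = 1 := by omega
          have ha : pvAStep (run, cnt, len) pq = (1, cnt + 1, len) := by
            simp [pvAStep, hlt, hlen1.symm]
          simp only [ha, hb]
          apply ih (acc ++ [run]) 1 (cnt+1) len (by omega)
          · rw [hmax]
          · rw [hcnt_app, h3, ← hlen1]
            simp [hr1]
        · have hgt1 : ¬ ((1:Int) > len) := by omega
          have ha : pvAStep (run, cnt, len) pq = (1, cnt, len) := by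
            simp [pvAStep, hlt, hlen1, hgt1]
          simp only [ha, hb]
          apply ih (acc ++ [run]) 1 cnt len (by omega)
          · rw [hmax]
          · rw [hcnt_app, h3]
            simp [hlen1]

lemma pv_max?_append (acc : List Int) (run : Int) :
    PySem.List.max? (acc ++ [run]) (fun x => x) = some (acc.foldl max run) := by
  cases acc with
  | nil => simp [PySem.List.max?_id_cons]
  | cons x t =>
      rw [List.cons_append, PySem.List.max?_id_cons]
      congr 1
      rw [List.foldl_append]
      simp only [List.foldl_cons, List.foldl_nil]
      rw [max_comm run x, pv_foldl_max_init']

-- ===== VERDICT (by name: the statement is the Claim_ definition above) =====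
theorem count_subarray_spec : Claim_equal_count_subarray := by
  intro A _
  show count_subarray A = count_subarray_alt A
  cases A with
  | nil => rfl
  | cons a rest =>
      unfold count_subarray count_subarray_alt
      have hidx := pv_fold_idx (a :: rest)
        (fun st pq => pvAStep st pq) ((a :: rest).length) 0 (1,1,1) (by omega)
      simp only [Nat.cast_zero, zero_add] at hidx
      have hA : ((PySem.List.pyRange 1 (PySem.List.len (a :: rest)) 1).foldl
          (fun (st : Int × Int × Int) i =>
            let current := if PySem.List.pyGetD (a :: rest) (i-1) 0 < PySem.List.pyGetD (a :: rest) i 0 then st.1 + 1 else (1:Int)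
            if current = st.2.2 then (current, st.2.1 + 1, st.2.2)
            else if current > st.2.2 then (current, 1, current)
            else (current, st.2.1, st.2.2)) (1, 1, 1))
          = (((a :: rest).zip ((a :: rest).drop 1)).foldl pvAStep (1,1,1)) := hidx
      simp only [hA]
      have hzipB : (((a :: rest).zip ((a :: rest).drop 1)).foldl
          (fun (st : List Int × Int) pq =>
            if pq.1 < pq.2 then (st.1, st.2 + 1) else (st.1 ++ [st.2], 1)) ([], 1))
          = ((a :: rest).zip ((a :: rest).drop 1)).foldl pvBStep ([], 1) := rfl
      have hinv := pv_inv ((a :: rest).zip ((a :: rest).drop 1)) [] 1 1 1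
        (by omega) (by simp) (by simp)
      set S := ((a :: rest).zip ((a :: rest).drop 1)).foldl pvBStep ([], 1) with hS
      simp only [hzipB, hinv.2, pv_max?_append]
      rw [if_neg (List.cons_ne_nil a rest), PySem.List.count_eq, List.count_append]
      push_cast
      by_cases h : S.2 = List.foldl max S.2 S.1
      · rw [if_pos h, List.count_singleton']
        rw [if_pos h]
        norm_num
      · rw [if_neg h, List.count_singleton']
        rw [if_neg h]
        norm_num
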